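-- pv_equiv track=rewrite | github.com/alinashabaeva/word_order_modeling | src/extra_features.py | has_preceding_question
-- ===== SOURCE A (Python) =====
-- def has_preceding_question(context):
--     """
--     Check if the last (closest to target) speech sentence in context ends with '?'
--     Returns True if yes, False otherwise
--     """
--     if not context or not isinstance(context, str):
--         return False
--
--     speech_lines = []
--     for line in context.split('\n'):
--         if line.startswith('SPEECH:'):
--             speech_content = line[7:].strip()  # Remove 'SPEECH:' prefix
--             speech_lines.append(speech_content)
--
--     # Check if the last speech line ends with '?'
--     if speech_lines:
--         last_speech = speech_lines[-1].strip()
--         return last_speech.endswith('?')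
--
--     return False
-- ===== SOURCE B (Python) =====
-- def has_preceding_question(context):
--     """
--     Check if the last (closest to target) speech sentence in context ends with '?'
--     Returns True if yes, False otherwise
--     """
--     if not context or not isinstance(context, str):
--         return False
--     for line in reversed(context.split('\n')):
--         if line.startswith('SPEECH:'):
--             return line[7:].strip().endswith('?')
--     return False
-- ===== Notes on version B (the rewrite author's own statement) =====
-- stated objective: simpler
-- what changed: Instead of collecting every SPEECH line into a list and indexing the last one, B scans the split lines from the end and returns on the first SPEECH line it meets (the double strip of A collapses to one strip).
import Mathlib
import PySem

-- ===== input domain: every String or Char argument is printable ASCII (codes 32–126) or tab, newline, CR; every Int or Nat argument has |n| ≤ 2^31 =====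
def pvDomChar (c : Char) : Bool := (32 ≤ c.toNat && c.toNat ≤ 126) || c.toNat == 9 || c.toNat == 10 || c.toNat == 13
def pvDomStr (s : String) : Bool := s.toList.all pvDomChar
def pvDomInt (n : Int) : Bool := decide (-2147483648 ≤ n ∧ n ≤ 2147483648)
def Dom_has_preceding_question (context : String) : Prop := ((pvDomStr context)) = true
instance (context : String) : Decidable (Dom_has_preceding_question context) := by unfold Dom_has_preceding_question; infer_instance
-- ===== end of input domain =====

-- B replaces A's collect-all-SPEECH-lines-then-index-last loop by a reverse scan that
-- returns on the first SPEECH line from the end (simpler decomposition; one strip instead of two).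

-- ===== PORT A =====
def has_preceding_question (context : String) : Bool :=
  if context = "" then false
  else
    let speech_lines : List (List Char) :=
      (PySem.Chars.splitOn context.toList "\n".toList).foldl
        (fun acc line =>
          if PySem.Chars.startswith line "SPEECH:".toList then
            acc ++ [PySem.Chars.strip (PySem.Chars.slice line (some 7) none)]
          else acc) []
    if speech_lines ≠ [] then
      match PySem.List.pyGet? speech_lines (-1) with
      | some last_speech => PySem.Chars.endswith (PySem.Chars.strip last_speech) "?".toList
      | none => false   -- unreachable: [-1] on a nonempty list
    else false

-- ===== PORT B =====
-- 'for line in reversed(lines): if line.startswith("SPEECH:"): return …'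
def pvAltScan : List (List Char) → Bool
  | [] => false
  | line :: rest =>
    if PySem.Chars.startswith line "SPEECH:".toList then
      PySem.Chars.endswith (PySem.Chars.strip (PySem.Chars.slice line (some 7) none)) "?".toList
    else pvAltScan rest

def has_preceding_question_alt (context : String) : Bool :=
  if context = "" then false
  else pvAltScan (PySem.Chars.splitOn context.toList "\n".toList).reverse

-- ===== PRECONDITION & SPEC =====
def Spec_has_preceding_question (context : String) (out : Bool) : Prop := out = has_preceding_question_alt context
instance (context : String) (out : Bool) : Decidable (Spec_has_preceding_question context out) := by unfold Spec_has_preceding_question; infer_instance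

-- ===== CLAIM (what is proved, stated in full; the proofs are below) =====
def Claim_equal_has_preceding_question : Prop := ∀ (context : String), Dom_has_preceding_question context → Spec_has_preceding_question context (has_preceding_question context)

-- ===== LEMMAS AND PROOFS =====

theorem pv_dropWhile_idem {α : Type} (p : α → Bool) (l : List α) :
    List.dropWhile p (List.dropWhile p l) = List.dropWhile p l := by
  rw [List.dropWhile_eq_self_iff]
  intro hl hp
  have := List.head?_dropWhile_not p l
  rw [List.head?_eq_getElem?, List.getElem?_eq_getElem hl] at this
  simp_all

theorem pv_lstrip_prefix {l m : List Char} (h : m <+: PySem.Chars.lstrip l) :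
    PySem.Chars.lstrip m = m := by
  unfold PySem.Chars.lstrip at *
  rw [List.dropWhile_eq_self_iff]
  intro hl hp
  have hlt : 0 < (List.dropWhile PySem.Chars.isspace l).length := Nat.lt_of_lt_of_le hl h.length_le
  have hm : m[0] = (List.dropWhile PySem.Chars.isspace l)[0]'hlt := List.IsPrefix.getElem h hl
  have hnot := List.head?_dropWhile_not PySem.Chars.isspace l
  rw [List.head?_eq_getElem?, List.getElem?_eq_getElem hlt] at hnot
  simp_all

theorem pv_strip_idem (s : List Char) :
    PySem.Chars.strip (PySem.Chars.strip s) = PySem.Chars.strip s := by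
  unfold PySem.Chars.strip PySem.Chars.rstrip
  have h1 : (List.dropWhile PySem.Chars.isspace (PySem.Chars.lstrip s).reverse).reverse
      <+: PySem.Chars.lstrip s := by
    have := List.dropWhile_suffix (l := (PySem.Chars.lstrip s).reverse) PySem.Chars.isspace
    have := this.reverse
    simpa using this
  rw [pv_lstrip_prefix h1]
  rw [List.reverse_reverse, pv_dropWhile_idem]

theorem pv_find?_eq_head?_filter {α : Type} (p : α → Bool) (l : List α) :
    l.find? p = (l.filter p).head? := by
  induction l with
  | nil => rfl
  | cons x xs ih =>
    rw [List.find?_cons, List.filter_cons]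
    cases h : p x
    · exact ih
    · rfl

theorem pv_altScan_eq (l : List (List Char)) :
    pvAltScan l =
      match l.find? (fun line => PySem.Chars.startswith line "SPEECH:".toList) with
      | some line => PySem.Chars.endswith (PySem.Chars.strip (PySem.Chars.slice line (some 7) none)) "?".toList
      | none => false := by
  induction l with
  | nil => rfl
  | cons x xs ih =>
    cases h : PySem.Chars.startswith x "SPEECH:".toList <;>
      simp only [pvAltScan, List.find?, h, ih] <;> simp

theorem pv_pyGet?_neg_one {α : Type} (l : List α) (h : l ≠ []) :
    PySem.List.pyGet? l (-1) = l.getLast? := by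
  have hl : 0 < l.length := List.length_pos_iff.mpr h
  unfold PySem.List.pyGet? PySem.List.pyIdx?
  rw [if_neg (by omega), if_pos (show -(l.length : Int) ≤ -1 by omega)]
  norm_num
  rw [List.getLast?_eq_getElem?]

-- ===== VERDICT(by name: the statement is the Claim_ definition above) =====
theorem has_preceding_question_spec : Claim_equal_has_preceding_question := by
  intro context _
  unfold Spec_has_preceding_question has_preceding_question has_preceding_question_alt
  by_cases hc : context = ""
  · simp [hc]
  · simp only [if_neg hc]
    rw [pv_altScan_eq]
    have hfold := PySem.List.foldl_append_if
      (fun line => PySem.Chars.startswith line "SPEECH:".toList)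
      (fun line => PySem.Chars.strip (PySem.Chars.slice line (some 7) none))
      (PySem.Chars.splitOn context.toList "\n".toList) []
    rw [List.nil_append] at hfold
    rw [hfold]
    rw [pv_find?_eq_head?_filter, List.filter_reverse, List.head?_reverse]
    rcases hfl : ((PySem.Chars.splitOn context.toList "\n".toList).filter
        (fun line => PySem.Chars.startswith line "SPEECH:".toList)).getLast? with _ | line
    · rw [List.getLast?_eq_none_iff] at hfl
      rw [hfl]
      rfl
    · have hne : ((PySem.Chars.splitOn context.toList "\n".toList).filter
          (fun line => PySem.Chars.startswith line "SPEECH:".toList)).map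
          (fun line => PySem.Chars.strip (PySem.Chars.slice line (some 7) none)) ≠ [] := by
        intro h
        rw [List.map_eq_nil_iff.mp h] at hfl
        simp at hfl
      rw [if_pos hne, pv_pyGet?_neg_one _ hne, List.getLast?_map, hfl]
      simp [pv_strip_idem]
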